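-- pv_equiv track=rewrite | github.com/chandani-coditation/mercury | ai_service/step_transformation.py | calculate_estimated_time
-- ===== SOURCE A (Python) =====
-- from typing import List, Dict, Optional
--
-- def calculate_estimated_time(steps: List[Dict]) -> int:
--     """
--     Calculate estimated time in minutes based on step types and count.
--
--     Args:
--         steps: List of transformed steps
--
--     Returns:
--         Estimated time in minutes
--     """
--     if not steps:
--         return 0
--
--     # Base time per step type (minutes)
--     time_per_type = {
--         "investigation": 5,
--         "mitigation": 10,
--         "resolution": 15,
--         "verification": 5,
--         "rollback": 10,
--     }
--
--     total_time = 0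
--     for step in steps:
--         step_type = step.get("_inferred_step_type", "investigation")
--         base_time = time_per_type.get(step_type, 10)
--         # Adjust for risk level
--         risk_level_raw = step.get("risk_level", "medium")
--         risk_level = risk_level_raw.lower() if risk_level_raw else "medium"
--         if risk_level == "high":
--             base_time = int(base_time * 1.5)
--         elif risk_level == "low":
--             base_time = int(base_time * 0.8)
--         total_time += base_time
--
--     return total_time
-- ===== SOURCE B (Python) =====
-- from typing import List, Dict
--
-- def calculate_estimated_time(steps: List[Dict]) -> int:
--     time_per_type = {
--         "investigation": 5,
--         "mitigation": 10,
--         "resolution": 15,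
--         "verification": 5,
--         "rollback": 10,
--     }
--     # One pass: count occurrences of each (step_type, risk_level) combination.
--     counts = {}
--     for step in steps:
--         step_type = step.get("_inferred_step_type", "investigation")
--         risk_raw = step.get("risk_level", "medium")
--         risk = risk_raw.lower() if risk_raw else "medium"
--         key = (step_type, risk)
--         counts[key] = counts.get(key, 0) + 1
--     # Then compute the adjusted time once per distinct combination.
--     total = 0
--     for (step_type, risk), n in counts.items():
--         base = time_per_type.get(step_type, 10)
--         if risk == "high":
--             base = int(base * 1.5)
--         elif risk == "low":
--             base = int(base * 0.8)
--         total += n * base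
--     return total
-- ===== Notes on version B (the rewrite author's own statement) =====
-- stated objective: alternative
-- what changed: Instead of adjusting and adding a time per step, B makes one pass building a counter keyed by (step_type, risk_level) and then sums count * adjusted_time over the few distinct combinations.
import Mathlib
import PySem

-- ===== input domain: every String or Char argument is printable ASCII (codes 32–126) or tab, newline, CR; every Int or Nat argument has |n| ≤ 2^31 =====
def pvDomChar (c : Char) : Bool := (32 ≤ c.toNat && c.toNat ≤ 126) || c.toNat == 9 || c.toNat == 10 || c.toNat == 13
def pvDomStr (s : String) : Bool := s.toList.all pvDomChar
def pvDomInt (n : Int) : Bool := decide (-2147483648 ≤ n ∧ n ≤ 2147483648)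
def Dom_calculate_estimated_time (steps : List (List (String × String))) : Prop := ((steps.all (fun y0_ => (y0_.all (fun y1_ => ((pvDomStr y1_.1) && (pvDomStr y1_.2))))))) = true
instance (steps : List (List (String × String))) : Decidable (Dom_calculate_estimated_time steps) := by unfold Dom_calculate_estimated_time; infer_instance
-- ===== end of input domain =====

-- B aggregates steps into a counter keyed by (step_type, risk_level) and sums count * adjusted time
-- over the distinct combinations, instead of A's per-step running total (alternative decomposition).

-- ===== PORT A =====
-- A's per-step loop with a running total. Python's int(base_time * 1.5) / int(base_time * 0.8):
-- base_time only ever takes the values 5, 10 or 15, and for these the float computations are exactly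
-- floordiv (base*3) 2 (7, 15, 22) and floordiv (base*4) 5 (4, 8, 12); ported so (exact on this domain).
def calculate_estimated_time (steps : List (List (String × String))) : Int :=
  if steps = [] then 0
  else
    let time_per_type : PySem.Dict String Int :=
      PySem.Dict.ofList [("investigation", 5), ("mitigation", 10), ("resolution", 15),
                         ("verification", 5), ("rollback", 10)]
    steps.foldl (fun total_time step =>
      let stepD : PySem.Dict String String := PySem.Dict.ofList step
      let step_type := stepD.getD "_inferred_step_type" "investigation"
      let base_time := time_per_type.getD step_type 10
      let risk_level_raw := stepD.getD "risk_level" "medium"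
      let risk_level := if risk_level_raw ≠ "" then PySem.Str.lower risk_level_raw else "medium"
      let base_time :=
        if risk_level = "high" then PySem.Int.floordiv (base_time * 3) 2
        else if risk_level = "low" then PySem.Int.floordiv (base_time * 4) 5
        else base_time
      total_time + base_time) 0

-- ===== PORT B =====
-- first loop of Source B: build counts[(step_type, risk)] += 1
def pvCountsB (steps : List (List (String × String))) : PySem.Dict (String × String) Int :=
  steps.foldl (fun counts step =>
    let stepD : PySem.Dict String String := PySem.Dict.ofList step
    let step_type := stepD.getD "_inferred_step_type" "investigation"
    let risk_raw := stepD.getD "risk_level" "medium"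
    let risk := if risk_raw ≠ "" then PySem.Str.lower risk_raw else "medium"
    let key := (step_type, risk)
    counts.insert key (counts.getD key 0 + 1)) PySem.Dict.empty

-- second loop of Source B: total += n * adjusted base (same float-to-floordiv port note as in A)
def calculate_estimated_time_alt (steps : List (List (String × String))) : Int :=
  let time_per_type : PySem.Dict String Int :=
    PySem.Dict.ofList [("investigation", 5), ("mitigation", 10), ("resolution", 15),
                       ("verification", 5), ("rollback", 10)]
  (pvCountsB steps).items.foldl (fun total kv =>
    let step_type := kv.1.1
    let risk := kv.1.2
    let n := kv.2
    let base := time_per_type.getD step_type 10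
    let base :=
      if risk = "high" then PySem.Int.floordiv (base * 3) 2
      else if risk = "low" then PySem.Int.floordiv (base * 4) 5
      else base
    total + n * base) 0

-- ===== PRECONDITION & SPEC =====
def Spec_calculate_estimated_time (steps : List (List (String × String))) (out : Int) : Prop := out = calculate_estimated_time_alt steps
instance (steps : List (List (String × String))) (out : Int) : Decidable (Spec_calculate_estimated_time steps out) := by unfold Spec_calculate_estimated_time; infer_instance

-- ===== CLAIM (what is proved, stated in full; the proofs are below) =====
def Claim_equal_calculate_estimated_time : Prop := ∀ (steps : List (List (String × String))), Dom_calculate_estimated_time steps → Spec_calculate_estimated_time steps (calculate_estimated_time steps)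

-- ===== LEMMAS AND PROOFS =====

-- the (step_type, risk) key both programs derive from a step
def pvKey (step : List (String × String)) : String × String :=
  let stepD : PySem.Dict String String := PySem.Dict.ofList step
  let step_type := stepD.getD "_inferred_step_type" "investigation"
  let risk_raw := stepD.getD "risk_level" "medium"
  (step_type, if risk_raw ≠ "" then PySem.Str.lower risk_raw else "medium")

-- the adjusted time both programs assign to a key
def pvF (k : String × String) : Int :=
  let time_per_type : PySem.Dict String Int :=
    PySem.Dict.ofList [("investigation", 5), ("mitigation", 10), ("resolution", 15),
                       ("verification", 5), ("rollback", 10)]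
  let base := time_per_type.getD k.1 10
  if k.2 = "high" then PySem.Int.floordiv (base * 3) 2
  else if k.2 = "low" then PySem.Int.floordiv (base * 4) 5
  else base

lemma foldl_add_f {α : Type} (f : α → Int) (l : List α) (a : Int) :
    l.foldl (fun t k => t + f k) a = a + (l.map f).sum := by
  induction l generalizing a with
  | nil => simp
  | cons x xs ih => simp [List.foldl_cons, ih, add_assoc]

lemma sum_indicator (S : List (String × String)) (x : String × String)
    (hnd : S.Nodup) (hx : x ∈ S) (f : (String × String) → Int) :
    (S.map (fun k => if k = x then f k else 0)).sum = f x := by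
  induction S with
  | nil => simp at hx
  | cons a S ih =>
    rcases List.mem_cons.1 hx with h | h
    · subst h
      have hz : (S.map (fun k => if k = x then f k else 0)).sum = 0 := by
        apply List.sum_eq_zero
        intro y hy
        rcases List.mem_map.1 hy with ⟨k, hk, hky⟩
        have hne : k ≠ x := fun he => (List.nodup_cons.1 hnd).1 (he ▸ hk)
        simp [hne] at hky
        omega
      simp [hz]
    · have hns : x ≠ a := fun he => (List.nodup_cons.1 hnd).1 (he ▸ h)
      simp [hns.symm, ih (List.nodup_cons.1 hnd).2 h]

lemma sum_count_mul (L S : List (String × String)) (hnd : S.Nodup)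
    (hmem : ∀ x ∈ L, x ∈ S) (f : (String × String) → Int) :
    (S.map (fun k => (L.count k : Int) * f k)).sum = (L.map f).sum := by
  induction L with
  | nil => simp
  | cons x L ih =>
    have hx : x ∈ S := hmem x (List.mem_cons_self ..)
    have hmem' : ∀ y ∈ L, y ∈ S := fun y hy => hmem y (List.mem_cons_of_mem _ hy)
    have hsplit : ∀ k : String × String,
        ((x :: L).count k : Int) * f k
          = (L.count k : Int) * f k + (if k = x then f k else 0) := by
      intro k
      by_cases h : k = x
      · subst h; simp [List.count_cons_self]; push_cast; ring
      · have hbe : (x == k) = false := beq_eq_false_iff_ne.mpr (fun he => h he.symm)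
        simp [List.count_cons, hbe, h]
    calc (S.map (fun k => ((x :: L).count k : Int) * f k)).sum
        = (S.map (fun k => (L.count k : Int) * f k + (if k = x then f k else 0))).sum := by
          congr 1; exact List.map_congr_left (fun k _ => hsplit k)
      _ = (S.map (fun k => (L.count k : Int) * f k)).sum
            + (S.map (fun k => if k = x then f k else 0)).sum := by
          rw [← List.sum_map_add]
      _ = (L.map f).sum + f x := by rw [ih hmem', sum_indicator S x hnd hx]
      _ = ((x :: L).map f).sum := by simp [add_comm]

lemma countsB_eq_counter (steps : List (List (String × String))) :
    pvCountsB steps = PySem.Dict.counter (steps.map pvKey) := by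
  unfold pvCountsB
  rw [← PySem.Dict.foldl_insert_getD_add_one_eq_counter, List.foldl_map]
  rfl

lemma alt_eq_sum (steps : List (List (String × String))) :
    calculate_estimated_time_alt steps = ((steps.map pvKey).map pvF).sum := by
  have hitems : (pvCountsB steps).items
      = (PySem.Set.ofList (steps.map pvKey)).map
          (fun k => (k, ((steps.map pvKey).count k : Int))) := by
    rw [countsB_eq_counter]; exact PySem.Dict.items_counter (steps.map pvKey)
  show ((pvCountsB steps).items.foldl
      (fun total kv => total + kv.2 * pvF kv.1) 0)
      = ((steps.map pvKey).map pvF).sum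
  rw [hitems, List.foldl_map]
  show ((PySem.Set.ofList (steps.map pvKey)).foldl
      (fun t k => t + ((steps.map pvKey).count k : Int) * pvF k) 0) = _
  rw [foldl_add_f (f := fun k => ((steps.map pvKey).count k : Int) * pvF k), zero_add]
  exact sum_count_mul (steps.map pvKey) (PySem.Set.ofList (steps.map pvKey))
    (PySem.Set.nodup_ofList _) (fun x hx => (PySem.Set.mem_ofList _ _).2 hx) pvF

lemma a_eq_sum (steps : List (List (String × String))) :
    calculate_estimated_time steps = ((steps.map pvKey).map pvF).sum := by
  unfold calculate_estimated_time
  by_cases h : steps = []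
  · simp [h]
  · rw [if_neg h]
    show steps.foldl (fun t s => t + pvF (pvKey s)) 0 = _
    rw [foldl_add_f (f := fun s => pvF (pvKey s)), zero_add, List.map_map]
    rfl

-- ===== VERDICT (by name: the statement is the Claim_ definition above) =====
theorem calculate_estimated_time_spec : Claim_equal_calculate_estimated_time := by
  intro steps _
  unfold Spec_calculate_estimated_time
  rw [a_eq_sum, alt_eq_sum]
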